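-- pv_equiv track=rewrite | github.com/plat16022005/test-github | Bai06/Xử lí chuỗi/Bai24.py | dem_so_lan
-- ===== SOURCE A (Python) =====
-- def dem_so_lan(a = str()):
--     a = a.lower()
--     chu = []
--     chu = a.split()
--     dest = {}
--     for i in chu:
--         if "a" <= i <= "z":
--             if i not in dest:
--                 dest[i] = 1
--             else:
--                 dest[i] += 1
--     return dest
-- ===== SOURCE B (Python) =====
-- def dem_so_lan(a = str()):
--     words = [w for w in a.lower().split() if "a" <= w <= "z"]
--     def go(ws):
--         if not ws:
--             return {}
--         h = ws[0]
--         d = {h: ws.count(h)}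
--         d.update(go([w for w in ws[1:] if w != h]))
--         return d
--     return go(words)
-- ===== Notes on version B (the rewrite author's own statement) =====
-- stated objective: alternative
-- what changed: Replaces A's single-pass incremental dict tally by a count-and-remove recursion: take the first remaining word, count all its occurrences at once, delete them all, and recurse on the shrunken list; no running counter is maintained.
import Mathlib
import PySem

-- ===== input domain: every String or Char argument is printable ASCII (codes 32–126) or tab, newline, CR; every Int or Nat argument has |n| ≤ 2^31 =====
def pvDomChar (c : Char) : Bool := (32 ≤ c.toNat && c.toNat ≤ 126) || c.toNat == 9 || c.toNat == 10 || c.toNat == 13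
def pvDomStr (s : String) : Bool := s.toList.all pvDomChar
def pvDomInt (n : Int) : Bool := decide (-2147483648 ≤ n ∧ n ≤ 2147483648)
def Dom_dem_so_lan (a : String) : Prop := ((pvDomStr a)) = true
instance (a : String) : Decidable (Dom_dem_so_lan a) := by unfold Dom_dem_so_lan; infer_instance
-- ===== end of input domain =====

-- B replaces A's incremental dict tally by a count-and-remove recursion on the word list (alternative decomposition, same results).

-- ===== PORT A =====
def dem_so_lan (a : String) : List (String × Int) :=
  let a' := PySem.Str.lower a
  let chu : List String := PySem.Str.split₀ a'
  let dest : PySem.Dict String Int :=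
    chu.foldl (fun dest i =>
      if "a" ≤ i ∧ i ≤ "z" then
        if ¬ dest.contains i then dest.insert i 1
        else dest.modify i 0 (· + 1)
      else dest) PySem.Dict.empty
  dest.items

-- ===== PORT B =====
-- go(ws): count the first word's occurrences at once, delete them all, recurse.
def pvGoB : List String → List (String × Int)
  | [] => []
  | h :: t =>
      (h, ((h :: t).count h : Int)) :: pvGoB (t.filter (fun w => w != h))
termination_by ws => ws.length
decreasing_by
  simpa using Nat.lt_succ_of_le (List.length_filter_le _ t)

def dem_so_lan_alt (a : String) : List (String × Int) :=
  let words := (PySem.Str.split₀ (PySem.Str.lower a)).filter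
    (fun w => decide ("a" ≤ w ∧ w ≤ "z"))
  pvGoB words

-- ===== PRECONDITION & SPEC =====
def Spec_dem_so_lan (a : String) (out : List (String × Int)) : Prop := out = dem_so_lan_alt a
instance (a : String) (out : List (String × Int)) : Decidable (Spec_dem_so_lan a out) := by unfold Spec_dem_so_lan; infer_instance

-- ===== CLAIM (what is proved, stated in full; the proofs are below) =====
def Claim_equal_dem_so_lan : Prop := ∀ (a : String), Dom_dem_so_lan a → Spec_dem_so_lan a (dem_so_lan a)

-- ===== LEMMAS AND PROOFS =====
lemma pv_insert_eq_modify (d : PySem.Dict String Int) (x : String)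
    (hc : d.contains x = false) : d.insert x 1 = d.modify x 0 (· + 1) := by
  simp [PySem.Dict.insert, PySem.Dict.modify, hc,
    PySem.Dict.getD_of_not_contains d 0 hc]

-- A's loop is the counting loop over the filtered word list.
lemma pv_fold_eq (xs : List String) (d : PySem.Dict String Int) :
    xs.foldl (fun dest i =>
      if "a" ≤ i ∧ i ≤ "z" then
        if ¬ dest.contains i then dest.insert i 1
        else dest.modify i 0 (· + 1)
      else dest) d
    = (xs.filter (fun w => decide ("a" ≤ w ∧ w ≤ "z"))).foldl
        (fun d x => d.modify x 0 (· + 1)) d := by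
  induction xs generalizing d with
  | nil => rfl
  | cons x t ih =>
    rw [List.foldl_cons, List.filter_cons]
    by_cases hp : "a" ≤ x ∧ x ≤ "z"
    · rw [if_pos hp, decide_eq_true hp, if_pos rfl, List.foldl_cons]
      by_cases hc : d.contains x
      · rw [if_neg (by simp [hc]), ih]
      · rw [if_pos (by simp [eq_false_of_ne_true hc]),
          pv_insert_eq_modify d x (eq_false_of_ne_true hc), ih]
    · rw [if_neg hp, decide_eq_false hp, if_neg (by simp), ih]

-- foldl add skips every occurrence of an element already in the accumulator.
lemma pv_foldl_add_filter (h : String) (xs : List String) (s : PySem.Set String)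
    (hs : s.contains h = true) :
    xs.foldl PySem.Set.add s = (xs.filter (fun w => w != h)).foldl PySem.Set.add s := by
  induction xs generalizing s with
  | nil => rfl
  | cons y ys ih =>
    rw [List.foldl_cons, List.filter_cons]
    by_cases hy : y = h
    · subst hy
      rw [bne_self_eq_false, if_neg (by simp)]
      have : PySem.Set.add s y = s := by unfold PySem.Set.add; rw [hs]; simp
      rw [this, ih s hs]
    · rw [if_pos (by simp [bne, hy]), List.foldl_cons]
      apply ih
      simp [PySem.Set.add]
      split <;> simp_all [PySem.Set.contains, List.contains_eq_mem]

-- a head element absent from the rest of the list stays in front through the fold.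
lemma pv_foldl_add_cons (h : String) (xs : List String) (s : List String)
    (hx : ∀ y ∈ xs, y ≠ h) :
    xs.foldl PySem.Set.add (h :: s) = h :: xs.foldl PySem.Set.add s := by
  induction xs generalizing s with
  | nil => rfl
  | cons y ys ih =>
    have hy : y ≠ h := hx y (by simp)
    rw [List.foldl_cons, List.foldl_cons]
    have hstep : PySem.Set.add (h :: s) y = h :: PySem.Set.add s y := by
      have hc : PySem.Set.contains (h :: s) y = PySem.Set.contains s y := by
        simp [PySem.Set.contains, List.contains_eq_mem, hy]
      simp only [PySem.Set.add, hc]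
      split <;> simp
    rw [hstep, ih _ (fun y hy' => hx y (by simp [hy']))]

-- first-occurrence dedup of h :: t: h, then the dedup of t with all h's removed.
lemma pv_ofList_cons (h : String) (t : List String) :
    PySem.Set.ofList (h :: t) = h :: PySem.Set.ofList (t.filter (fun w => w != h)) := by
  have e1 : PySem.Set.ofList (h :: t) = t.foldl PySem.Set.add [h] := by
    simp [PySem.Set.ofList, PySem.Set.empty, PySem.Set.add, List.contains_eq_mem]
  rw [e1, pv_foldl_add_filter h t [h] (by simp [PySem.Set.contains, List.contains_eq_mem]),
    pv_foldl_add_cons h _ []]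
  · rfl
  · intro y hy
    simpa using (List.of_mem_filter hy)

-- B's recursion computes exactly (first-occurrence word, total count) pairs.
lemma pv_go_eq (ws : List String) :
    pvGoB ws = (PySem.Set.ofList ws).map (fun k => (k, (ws.count k : Int))) := by
  induction hn : ws.length using Nat.strong_induction_on generalizing ws with
  | _ n ih =>
    match ws with
    | [] => simp [pvGoB, PySem.Set.ofList, PySem.Set.empty]
    | h :: t =>
      rw [pvGoB, pv_ofList_cons, List.map_cons]
      congr 1
      have hlen : (t.filter (fun w => w != h)).length < n := by
        subst hn
        simpa using Nat.lt_succ_of_le (List.length_filter_le _ t)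
      rw [ih _ hlen _ rfl]
      apply List.map_congr_left
      intro k hk
      have hk' : k ∈ t.filter (fun w => w != h) := by
        simpa using (PySem.Set.mem_ofList _ k).mp hk
      have hne : k ≠ h := by
        have := List.of_mem_filter hk'
        simpa using this
      have : (t.filter (fun w => w != h)).count k = t.count k := by
        rw [List.count_filter]
        simp [hne]
      simp [this, Ne.symm hne]

-- ===== VERDICT (by name: the statement is the Claim_ definition above) =====
theorem dem_so_lan_spec : Claim_equal_dem_so_lan := by
  intro a _
  unfold Spec_dem_so_lan dem_so_lan dem_so_lan_alt
  dsimp only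
  rw [pv_fold_eq, ← PySem.Dict.counter_eq_foldl, pv_go_eq]
  simp [PySem.Dict.items_counter]
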